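-- pv_equiv track=rewrite | github.com/miletic94/algorithms-and-data-structures | Algorithms and Data Structures/1. Data Structures/1. Arrays/Multidimentional/Problems/honey_bees.py | cell1
-- ===== SOURCE A (Python) =====
-- def cell1(x):
--     if x[1] % 2 == 0:
--         a = []
--         for i in range(x[0]-1, x[0]+2):
--             for j in range(x[1]-1, x[1]+2):
--                 if i == x[0] and j == x[1] or (i == x[0] + 1 and (j == x[1] - 1 or j == x[1] + 1)) or i == -1 or j == -1:
--                     pass
--                 else:
--
--                     a.append((i, j))
--         return a
--
--     if x[1] % 2 != 0:
--         b = []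
--         for i in range(x[0]-1, x[0]+2):
--             for j in range(x[1]-1, x[1]+2):
--                 if i == x[0] and j == x[1] or (i == x[0] - 1 and (j == x[1] - 1 or j == x[1] + 1)) or i == -1 or j == -1:
--                     pass
--                 else:
--
--                     b.append((i, j))
--         return b
-- ===== SOURCE B (Python) =====
-- def cell1(x):
--     r, c = x[0], x[1]
--     def row(i, js):
--         return [(i, c + d) for d in js]
--     if c % 2 == 0:
--         cand = row(r - 1, (-1, 0, 1)) + row(r, (-1, 1)) + row(r + 1, (0,))
--     else:
--         cand = row(r - 1, (0,)) + row(r, (-1, 1)) + row(r + 1, (-1, 0, 1))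
--     return [p for p in cand if -1 not in p]
-- ===== Notes on version B (the rewrite author's own statement) =====
-- stated objective: alternative
-- what changed: Replaces A's duplicated 3x3 nested-range scan with its fused compound skip condition by two staged passes: first construct the candidate list row by row from a per-row delta pattern (full/side/single row depending on column parity), then a separate filter pass dropping pairs containing -1.
import Mathlib
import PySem

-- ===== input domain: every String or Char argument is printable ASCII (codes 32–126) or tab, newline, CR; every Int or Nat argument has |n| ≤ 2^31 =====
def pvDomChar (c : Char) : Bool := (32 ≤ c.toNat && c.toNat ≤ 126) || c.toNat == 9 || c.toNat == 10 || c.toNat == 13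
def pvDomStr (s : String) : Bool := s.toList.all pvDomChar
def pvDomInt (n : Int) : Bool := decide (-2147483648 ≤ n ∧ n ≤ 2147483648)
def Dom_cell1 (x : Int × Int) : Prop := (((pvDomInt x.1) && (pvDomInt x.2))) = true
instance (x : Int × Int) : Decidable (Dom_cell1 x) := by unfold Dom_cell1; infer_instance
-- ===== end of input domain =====

-- B builds the candidate list row by row from per-row delta patterns and then filters
-- out pairs containing -1 in a second pass, instead of A's duplicated nested 3x3 scan
-- with a fused compound skip condition (alternative decomposition, same O(1) cost).

-- ===== PORT A =====
def cell1 (x : Int × Int) : List (Int × Int) :=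
  if PySem.Int.mod x.2 2 = 0 then
    (PySem.List.pyRange (x.1 - 1) (x.1 + 2) 1).foldl (fun a i =>
      (PySem.List.pyRange (x.2 - 1) (x.2 + 2) 1).foldl (fun a j =>
        if (i = x.1 ∧ j = x.2) ∨ (i = x.1 + 1 ∧ (j = x.2 - 1 ∨ j = x.2 + 1)) ∨ i = -1 ∨ j = -1
        then a else a ++ [(i, j)]) a) []
  else
    (PySem.List.pyRange (x.1 - 1) (x.1 + 2) 1).foldl (fun b i =>
      (PySem.List.pyRange (x.2 - 1) (x.2 + 2) 1).foldl (fun b j =>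
        if (i = x.1 ∧ j = x.2) ∨ (i = x.1 - 1 ∧ (j = x.2 - 1 ∨ j = x.2 + 1)) ∨ i = -1 ∨ j = -1
        then b else b ++ [(i, j)]) b) []

-- ===== PORT B =====
def cell1_alt (x : Int × Int) : List (Int × Int) :=
  let r := x.1
  let c := x.2
  let row : Int → List Int → List (Int × Int) := fun i js => js.map (fun d => (i, c + d))
  let cand :=
    if PySem.Int.mod c 2 = 0
    then row (r - 1) [-1, 0, 1] ++ row r [-1, 1] ++ row (r + 1) [0]
    else row (r - 1) [0] ++ row r [-1, 1] ++ row (r + 1) [-1, 0, 1]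
  cand.filter (fun p => !(p.1 == -1 || p.2 == -1))

-- ===== PRECONDITION & SPEC =====
def Spec_cell1 (x : Int × Int) (out : List (Int × Int)) : Prop := out = cell1_alt x
instance (x : Int × Int) (out : List (Int × Int)) : Decidable (Spec_cell1 x out) := by unfold Spec_cell1; infer_instance

-- ===== CLAIM (what is proved, stated in full; the proofs are below) =====
def Claim_equal_cell1 : Prop := ∀ (x : Int × Int), Dom_cell1 x → Spec_cell1 x (cell1 x)

-- ===== LEMMAS AND PROOFS =====
theorem pyRange3 (a : Int) : PySem.List.pyRange (a - 1) (a + 2) 1 = [a - 1, a, a + 1] := by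
  rw [PySem.List.pyRange_one]
  have h3 : (a + 2 - (a - 1)).toNat = 3 := by omega
  rw [h3]
  simp [List.range_succ]
  omega

-- ===== VERDICT (by name: the statement is the Claim_ definition above) =====
theorem cell1_spec : Claim_equal_cell1 := by
  intro x _
  obtain ⟨x0, x1⟩ := x
  unfold Spec_cell1 cell1 cell1_alt
  simp only [pyRange3, List.foldl, List.map]
  have a1 : (x0 - 1 = x0) = False := eq_false (by omega)
  have a2 : (x0 - 1 = x0 + 1) = False := eq_false (by omega)
  have a3 : (x0 + 1 = x0) = False := eq_false (by omega)
  have a4 : (x0 = x0 + 1) = False := eq_false (by omega)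
  have a7 : (x0 = x0 - 1) = False := eq_false (by omega)
  have a8 : (x0 + 1 = x0 - 1) = False := eq_false (by omega)
  have b1 : (x1 - 1 = x1) = False := eq_false (by omega)
  have b2 : (x1 + 1 = x1) = False := eq_false (by omega)
  have b4 : (x1 - 1 = x1 + 1) = False := eq_false (by omega)
  have b5 : (x1 = x1 - 1) = False := eq_false (by omega)
  have b6 : (x1 = x1 + 1) = False := eq_false (by omega)
  have b7 : (x1 + 1 = x1 - 1) = False := eq_false (by omega)
  have hadd0 : x1 + 0 = x1 := by ring
  have haddm : x1 + -1 = x1 - 1 := by ring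
  by_cases h : PySem.Int.mod x1 2 = 0 <;>
    simp only [h, if_true, if_false, hadd0, haddm, a1, a2, a3, a4, a7, a8,
      b1, b2, b4, b5, b6, b7, and_true, and_false, true_or, or_true, false_or, or_false] <;>
    by_cases h1 : x0 - 1 = -1 <;> by_cases h2 : x0 = -1 <;> by_cases h3 : x0 + 1 = -1 <;>
    by_cases h4 : x1 - 1 = -1 <;> by_cases h5 : x1 = -1 <;> by_cases h6 : x1 + 1 = -1 <;>
    first
      | omega
      | simp [h1, h2, h3, h4, h5, h6]
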